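-- pv_equiv track=rewrite | github.com/Salzfeld/ReliK | approach/experiment_controller.py | findingRankNegHead_Yago
-- ===== SOURCE A (Python) =====
-- def findingRankNegHead_Yago(orderedList, key, all_triples_set, fix, map, map_r):
--     '''
--     Helper function to find rank of triple with fixed head on the yago2 dataset
--     '''
--     counter = 1
--     for ele in orderedList:
--         if key[0] == ele[0] and key[1] == ele[1]:
--             return counter
--         tup = (map[fix],map_r[ele[0]],map[ele[1]])
--         if tup in all_triples_set:
--             continue
--         counter += 1
--     return None
-- ===== SOURCE B (Python) =====
-- def findingRankNegHead_Yago(orderedList, key, all_triples_set, fix, map, map_r):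
--     # Two-pass decomposition: pass 1 locates the first element matching the key
--     # (pos = len(orderedList) if absent); pass 2 counts, among the elements the
--     # scan covers (those before the match, or the whole list if there is none),
--     # the ones whose triple is not in all_triples_set. The rank is 1 + count,
--     # or None when the key never occurs.
--     n = len(orderedList)
--     pos = n
--     for i, ele in enumerate(orderedList):
--         if key[0] == ele[0] and key[1] == ele[1]:
--             pos = i
--             break
--     count = sum(1 for ele in orderedList[:pos]
--                 if (map[fix], map_r[ele[0]], map[ele[1]]) not in all_triples_set)
--     return None if pos == n else 1 + count
-- ===== Notes on version B (the rewrite author's own statement) =====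
-- stated objective: alternative
-- what changed: A fuses finding the matching element and counting into one loop with a running counter; B first locates the index of the first match, returns None if absent, and then counts the predecessors whose triple is not in all_triples_set in a separate pass over the prefix.
import Mathlib
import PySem

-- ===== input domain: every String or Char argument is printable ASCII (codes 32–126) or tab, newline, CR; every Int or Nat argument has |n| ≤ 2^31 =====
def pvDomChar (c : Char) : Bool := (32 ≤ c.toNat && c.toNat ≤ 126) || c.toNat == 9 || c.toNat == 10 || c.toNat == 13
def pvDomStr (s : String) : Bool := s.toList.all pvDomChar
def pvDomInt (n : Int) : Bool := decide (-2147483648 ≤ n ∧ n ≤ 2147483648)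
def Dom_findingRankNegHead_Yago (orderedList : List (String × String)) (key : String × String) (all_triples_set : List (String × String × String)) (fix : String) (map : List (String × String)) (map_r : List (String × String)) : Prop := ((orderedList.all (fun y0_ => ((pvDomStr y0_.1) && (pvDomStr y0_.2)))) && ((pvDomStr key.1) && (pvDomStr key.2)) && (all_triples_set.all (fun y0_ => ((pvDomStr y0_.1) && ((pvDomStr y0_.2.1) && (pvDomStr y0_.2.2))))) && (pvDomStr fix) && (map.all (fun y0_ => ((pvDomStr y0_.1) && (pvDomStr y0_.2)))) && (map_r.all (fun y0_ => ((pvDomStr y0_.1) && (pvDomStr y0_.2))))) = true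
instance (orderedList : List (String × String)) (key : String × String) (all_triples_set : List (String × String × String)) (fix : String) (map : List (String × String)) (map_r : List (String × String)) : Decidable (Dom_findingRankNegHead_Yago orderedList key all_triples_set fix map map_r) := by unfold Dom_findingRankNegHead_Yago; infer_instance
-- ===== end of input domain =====

-- B replaces A's fused scan-and-count loop by two separate passes (locate the first
-- match, then count unseen-triple predecessors in the prefix); objective: alternative
-- decomposition, same cost.

-- dict lookup (Python d[k]; none = KeyError), shared dict primitive for both ports
def pvLook (m : List (String × String)) (k : String) : Option String :=
  (PySem.Dict.mk m).get? k

-- ===== PORT A =====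
-- the single fused loop of A, carrying the running counter
def findingRankNegHead_YagoGo (key : String × String) (all_triples_set : List (String × String × String)) (fix : String) (map : List (String × String)) (map_r : List (String × String)) : List (String × String) → Int → Option Int
  | [], _ => none
  | ele :: rest, counter =>
    if key.1 == ele.1 && key.2 == ele.2 then some counter
    else
      match pvLook map fix, pvLook map_r ele.1, pvLook map ele.2 with
      | some a, some b, some c =>
        if all_triples_set.contains (a, b, c) then
          findingRankNegHead_YagoGo key all_triples_set fix map map_r rest counter
        else
          findingRankNegHead_YagoGo key all_triples_set fix map map_r rest (counter + 1)
      | _, _, _ => none   -- KeyError in Python; excluded by Pre_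

def findingRankNegHead_Yago (orderedList : List (String × String)) (key : String × String) (all_triples_set : List (String × String × String)) (fix : String) (map : List (String × String)) (map_r : List (String × String)) : Option Int :=
  findingRankNegHead_YagoGo key all_triples_set fix map map_r orderedList 1

-- ===== PORT B =====
-- predicate of B's counting pass: triple of ele is NOT in all_triples_set
def pvUnseen (all_triples_set : List (String × String × String)) (fix : String) (map : List (String × String)) (map_r : List (String × String)) (ele : String × String) : Bool :=
  match pvLook map fix, pvLook map_r ele.1, pvLook map ele.2 with
  | some a, some b, some c => !(all_triples_set.contains (a, b, c))
  | _, _, _ => false   -- KeyError in Python; excluded by Pre_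

def findingRankNegHead_Yago_alt (orderedList : List (String × String)) (key : String × String) (all_triples_set : List (String × String × String)) (fix : String) (map : List (String × String)) (map_r : List (String × String)) : Option Int :=
  let pos? := orderedList.findIdx? (fun ele => key.1 == ele.1 && key.2 == ele.2)
  let pos := pos?.getD orderedList.length
  let count : Int := (orderedList.take pos).countP (pvUnseen all_triples_set fix map map_r)
  match pos? with
  | none => none
  | some _ => some (1 + count)

-- ===== PRECONDITION & SPEC =====
-- Pre_ is exactly where Python A (and B) returns normally: every element scanned before
-- the first key match (all of orderedList if there is none) has its dict lookups defined;
-- elsewhere both Pythons raise KeyError.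
def Pre_findingRankNegHead_Yago (orderedList : List (String × String)) (key : String × String) (all_triples_set : List (String × String × String)) (fix : String) (map : List (String × String)) (map_r : List (String × String)) : Prop :=
  ∀ ele ∈ orderedList.takeWhile (fun ele => !(key.1 == ele.1 && key.2 == ele.2)),
    (pvLook map fix).isSome ∧ (pvLook map_r ele.1).isSome ∧ (pvLook map ele.2).isSome
instance (orderedList : List (String × String)) (key : String × String) (all_triples_set : List (String × String × String)) (fix : String) (map : List (String × String)) (map_r : List (String × String)) : Decidable (Pre_findingRankNegHead_Yago orderedList key all_triples_set fix map map_r) := by unfold Pre_findingRankNegHead_Yago; infer_instance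

def pvWitness_findingRankNegHead_Yago : (List (String × String)) × (String × String) × (List (String × String × String)) × String × (List (String × String)) × (List (String × String)) :=
  ([("a", "b"), ("c", "d")], ("c", "d"), [("x", "a", "b")], "f", [("f", "x"), ("b", "y")], [("a", "a")])

def Spec_findingRankNegHead_Yago (orderedList : List (String × String)) (key : String × String) (all_triples_set : List (String × String × String)) (fix : String) (map : List (String × String)) (map_r : List (String × String)) (out : Option Int) : Prop := out = findingRankNegHead_Yago_alt orderedList key all_triples_set fix map map_r
instance (orderedList : List (String × String)) (key : String × String) (all_triples_set : List (String × String × String)) (fix : String) (map : List (String × String)) (map_r : List (String × String)) (out : Option Int) : Decidable (Spec_findingRankNegHead_Yago orderedList key all_triples_set fix map map_r out) := by unfold Spec_findingRankNegHead_Yago; infer_instance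

-- ===== CLAIM (what is proved, stated in full; the proofs are below) =====
def Claim_equal_findingRankNegHead_Yago : Prop := ∀ (orderedList : List (String × String)) (key : String × String) (all_triples_set : List (String × String × String)) (fix : String) (map : List (String × String)) (map_r : List (String × String)), Dom_findingRankNegHead_Yago orderedList key all_triples_set fix map map_r → Pre_findingRankNegHead_Yago orderedList key all_triples_set fix map map_r → Spec_findingRankNegHead_Yago orderedList key all_triples_set fix map map_r (findingRankNegHead_Yago orderedList key all_triples_set fix map map_r)

-- ===== LEMMAS AND PROOFS =====

-- loop invariant: the fused loop of A equals "locate, then count" with counter as base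
lemma go_eq_locate_count (key : String × String) (ats : List (String × String × String)) (fix : String) (map map_r : List (String × String)) :
    ∀ (l : List (String × String)) (counter : Int),
    (∀ ele ∈ l.takeWhile (fun ele => !(key.1 == ele.1 && key.2 == ele.2)),
      (pvLook map fix).isSome ∧ (pvLook map_r ele.1).isSome ∧ (pvLook map ele.2).isSome) →
    findingRankNegHead_YagoGo key ats fix map map_r l counter =
      match l.findIdx? (fun ele => key.1 == ele.1 && key.2 == ele.2) with
      | none => none
      | some pos => some (counter + ((l.take pos).countP (pvUnseen ats fix map map_r))) := by
  intro l
  induction l with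
  | nil => intro counter _; rfl
  | cons e rest ih =>
    intro counter hpre
    by_cases hm : (key.1 == e.1 && key.2 == e.2) = true
    · simp [findingRankNegHead_YagoGo, hm, List.findIdx?_cons]
    · have hmf : (key.1 == e.1 && key.2 == e.2) = false := by
        rwa [Bool.not_eq_true] at hm
      have hq : (!(key.1 == e.1 && key.2 == e.2)) = true := by rw [hmf]; rfl
      have htw : (e :: rest).takeWhile (fun ele => !(key.1 == ele.1 && key.2 == ele.2)) =
          e :: rest.takeWhile (fun ele => !(key.1 == ele.1 && key.2 == ele.2)) :=
        List.takeWhile_cons_of_pos hq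
      obtain ⟨hf, hr, hs⟩ := hpre e (by rw [htw]; exact List.mem_cons_self)
      obtain ⟨a, ha⟩ := Option.isSome_iff_exists.mp hf
      obtain ⟨b, hb⟩ := Option.isSome_iff_exists.mp hr
      obtain ⟨c, hc⟩ := Option.isSome_iff_exists.mp hs
      have hpre' : ∀ ele ∈ rest.takeWhile (fun ele => !(key.1 == ele.1 && key.2 == ele.2)),
          (pvLook map fix).isSome ∧ (pvLook map_r ele.1).isSome ∧ (pvLook map ele.2).isSome := by
        intro ele hmem
        exact hpre ele (by rw [htw]; exact List.mem_cons_of_mem _ hmem)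
      have hu : pvUnseen ats fix map map_r e = !(ats.contains (a, b, c)) := by
        simp only [pvUnseen, ha, hb, hc]
      have hstep : findingRankNegHead_YagoGo key ats fix map map_r (e :: rest) counter =
          if ats.contains (a, b, c) then
            findingRankNegHead_YagoGo key ats fix map map_r rest counter
          else
            findingRankNegHead_YagoGo key ats fix map map_r rest (counter + 1) := by
        simp only [findingRankNegHead_YagoGo, hmf, ha, hb, hc, Bool.false_eq_true, if_false]
      by_cases hc2 : ats.contains (a, b, c) = true
      · rw [hstep, if_pos hc2, ih counter hpre']
        cases hfi : rest.findIdx? (fun ele => key.1 == ele.1 && key.2 == ele.2) with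
        | none => simp [List.findIdx?_cons, hmf, hfi]
        | some pos =>
          simp only [List.findIdx?_cons, hmf, Bool.false_eq_true, if_false, hfi,
            Option.map_some, List.take_succ_cons, List.countP_cons, hu, hc2]
          simp
      · have hc2f : ats.contains (a, b, c) = false := by rwa [Bool.not_eq_true] at hc2
        rw [hstep, if_neg (by rw [hc2f]; exact Bool.false_ne_true), ih (counter + 1) hpre']
        cases hfi : rest.findIdx? (fun ele => key.1 == ele.1 && key.2 == ele.2) with
        | none => simp [List.findIdx?_cons, hmf, hfi]
        | some pos =>
          simp only [List.findIdx?_cons, hmf, Bool.false_eq_true, if_false, hfi,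
            Option.map_some, List.take_succ_cons, List.countP_cons, hu, hc2f, Bool.not_false, if_true]
          rw [Option.some.injEq]
          push_cast
          ring

-- ===== VERDICT (by name: the statement is the Claim_ definition above) =====
theorem findingRankNegHead_Yago_spec : Claim_equal_findingRankNegHead_Yago := by
  intro ol key ats fix map map_r _ hpre
  unfold Spec_findingRankNegHead_Yago findingRankNegHead_Yago findingRankNegHead_Yago_alt
  rw [go_eq_locate_count key ats fix map map_r ol 1 hpre]
  cases ol.findIdx? (fun ele => key.1 == ele.1 && key.2 == ele.2) <;> simp
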